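-- pv_equiv track=rewrite | github.com/Kazun1998/library_for_python | Convolution/MIN_Convolution.py | Convolution_MIN
-- ===== SOURCE A (Python) =====
-- def More_Zeta_Transform(A):
--     """ A の以上を走る Zeta 変換を行う.
--
--     """
--     for i in range(len(A)-2,-1,-1):
--         A[i]=(A[i]+A[i+1])%Mod
--
-- def More_Mobius_Transform(A):
--     """ A の以下を走るにおける Mobius 変換を行う.
--
--     """
--
--     for i in range(len(A)-1):
--         A[i]=(A[i]-A[i+1])%Mod
--
-- def Convolution_MIN(A,B):
--     """ A,B の min における畳み込みを行う.
--     """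
--
--     N=len(A); M=len(B)
--     L=max(N,M)
--
--     A=A+[0]*(L-N)
--     B=B+[0]*(L-M)
--
--     More_Zeta_Transform(A)
--     More_Zeta_Transform(B)
--
--     for i in range(L):
--         A[i]*=B[i]
--         A[i]%=Mod
--
--     More_Mobius_Transform(A)
--     return A
--
-- Mod=998244353
-- ===== SOURCE B (Python) =====
-- Mod = 998244353
--
-- def Convolution_MIN(A, B):
--     """ A,B の min における畳み込み (suffix-sum formulation, no zeta/mobius passes). """
--     N = len(A); M = len(B)
--     L = max(N, M)
--     A2 = A + [0] * (L - N)
--     B2 = B + [0] * (L - M)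
--     SA = [0]; SB = [0]
--     for a, b in zip(reversed(A2), reversed(B2)):
--         SA.append((a + SA[-1]) % Mod)
--         SB.append((b + SB[-1]) % Mod)
--     SA.reverse(); SB.reverse()
--     return [(A2[k] * SB[k] + SA[k + 1] * B2[k]) % Mod for k in range(L)]
-- ===== Notes on version B (the rewrite author's own statement) =====
-- stated objective: alternative
-- what changed: Replaces the zeta-transform / pointwise-multiply / mobius-transform pipeline over mutated arrays by one backward suffix-sum pass (SA, SB) and a single forward combining pass C[k] = (A[k]*SB[k] + SA[k+1]*B[k]) % Mod.
import Mathlib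
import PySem

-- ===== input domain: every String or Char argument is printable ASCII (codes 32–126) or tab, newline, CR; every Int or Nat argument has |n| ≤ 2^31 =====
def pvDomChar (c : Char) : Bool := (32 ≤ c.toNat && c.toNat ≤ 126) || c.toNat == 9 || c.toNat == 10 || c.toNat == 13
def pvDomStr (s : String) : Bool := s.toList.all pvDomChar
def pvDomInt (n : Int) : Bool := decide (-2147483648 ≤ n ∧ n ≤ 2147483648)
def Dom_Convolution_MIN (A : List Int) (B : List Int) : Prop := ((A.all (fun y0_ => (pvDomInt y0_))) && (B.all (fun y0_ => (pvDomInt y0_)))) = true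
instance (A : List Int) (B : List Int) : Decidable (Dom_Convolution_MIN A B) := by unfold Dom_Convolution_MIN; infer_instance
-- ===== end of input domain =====

-- B replaces the zeta–multiply–mobius pipeline by one backward suffix-sum pass and one
-- forward combining pass C[k] = (A[k]*SB[k] + SA[k+1]*B[k]) % Mod (objective: alternative).
-- Neither program mutates its arguments (A rebinds its parameters before modifying).

-- ===== PORT A =====
def pvMod : Int := 998244353

def moreZeta (X : List Int) : List Int :=
  (PySem.List.pyRange ((X.length : Int) - 2) (-1) (-1)).foldl
    (fun A i => PySem.List.pySetD A i
      (PySem.Int.mod (PySem.List.pyGetD A i 0 + PySem.List.pyGetD A (i+1) 0) pvMod)) X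

def moreMobius (X : List Int) : List Int :=
  (PySem.List.pyRange 0 ((X.length : Int) - 1) 1).foldl
    (fun A i => PySem.List.pySetD A i
      (PySem.Int.mod (PySem.List.pyGetD A i 0 - PySem.List.pyGetD A (i+1) 0) pvMod)) X

def Convolution_MIN (A : List Int) (B : List Int) : List Int :=
  let N := A.length
  let M := B.length
  let L := max N M
  let A2 := A ++ List.replicate (L - N) 0
  let B2 := B ++ List.replicate (L - M) 0
  let A3 := moreZeta A2
  let B3 := moreZeta B2
  let A4 := (PySem.List.pyRange 0 (L : Int) 1).foldl
    (fun A' i => PySem.List.pySetD A' i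
      (PySem.Int.mod (PySem.List.pyGetD A' i 0 * PySem.List.pyGetD B3 i 0) pvMod)) A3
  moreMobius A4

-- ===== PORT B =====
def Convolution_MIN_alt (A : List Int) (B : List Int) : List Int :=
  let N := A.length
  let M := B.length
  let L := max N M
  let A2 := A ++ List.replicate (L - N) 0
  let B2 := B ++ List.replicate (L - M) 0
  let P := (List.zip A2.reverse B2.reverse).foldl
    (fun (s : List Int × List Int) ab =>
      (s.1 ++ [PySem.Int.mod (ab.1 + PySem.List.pyGetD s.1 (-1) 0) pvMod],
       s.2 ++ [PySem.Int.mod (ab.2 + PySem.List.pyGetD s.2 (-1) 0) pvMod])) ([0], [0])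
  let SA := P.1.reverse
  let SB := P.2.reverse
  (PySem.List.pyRange 0 (L : Int) 1).map (fun k =>
    PySem.Int.mod (PySem.List.pyGetD A2 k 0 * PySem.List.pyGetD SB k 0
      + PySem.List.pyGetD SA (k+1) 0 * PySem.List.pyGetD B2 k 0) pvMod)

-- ===== PRECONDITION & SPEC =====
def Spec_Convolution_MIN (A : List Int) (B : List Int) (out : List Int) : Prop := out = Convolution_MIN_alt A B
instance (A : List Int) (B : List Int) (out : List Int) : Decidable (Spec_Convolution_MIN A B out) := by unfold Spec_Convolution_MIN; infer_instance

-- ===== CLAIM (what is proved, stated in full; the proofs are below) =====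
def Claim_equal_Convolution_MIN : Prop := ∀ (A : List Int) (B : List Int), Dom_Convolution_MIN A B → Spec_Convolution_MIN A B (Convolution_MIN A B)

-- ===== LEMMAS AND PROOFS =====

def zetaL : List Int → List Int
  | [] => []
  | [a] => [a]
  | a :: b :: r => PySem.Int.mod (a + (zetaL (b :: r)).headD 0) pvMod :: zetaL (b :: r)

lemma pyGetD_cons_succ (x : Int) (xs : List Int) (i : Int) (h : 0 ≤ i) (d : Int) :
    PySem.List.pyGetD (x :: xs) (i + 1) d = PySem.List.pyGetD xs i d := by
  obtain ⟨n, rfl⟩ := Int.eq_ofNat_of_zero_le h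
  have h1 : ((n : Int) + 1) = ((n + 1 : Nat) : Int) := by push_cast; ring
  rw [h1, PySem.List.pyGetD_natCast, PySem.List.pyGetD_natCast]
  rfl

lemma pySetD_cons_succ (x : Int) (xs : List Int) (i : Int) (h : 0 ≤ i) (v : Int) :
    PySem.List.pySetD (x :: xs) (i + 1) v = x :: PySem.List.pySetD xs i v := by
  rw [PySem.List.pySetD_of_nonneg _ _ (by omega : (0:Int) ≤ i + 1),
      PySem.List.pySetD_of_nonneg _ _ h]
  have h2 : (i + 1).toNat = i.toNat + 1 := by omega
  rw [h2]
  rfl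

lemma pySetD_zero_cons (x : Int) (xs : List Int) (v : Int) :
    PySem.List.pySetD (x :: xs) 0 v = v :: xs := by
  rw [PySem.List.pySetD_of_nonneg _ _ le_rfl]
  rfl

lemma pvFoldrShift {α : Type} (F G : List α → Int → List α)
    (h : ∀ (c : α) (T : List α) (i : Int), 0 ≤ i → F (c :: T) (i + 1) = c :: G T i) :
    ∀ (l : List Int), (∀ i ∈ l, 0 ≤ i) → ∀ (c : α) (T : List α),
      l.foldr (fun i A => F A (i + 1)) (c :: T) = c :: l.foldr (fun i A => G A i) T := by
  intro l
  induction l with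
  | nil => intro _ c T; rfl
  | cons i l ih =>
    intro h0 c T
    simp only [List.foldr_cons]
    rw [ih (fun j hj => h0 j (by simp [hj])) c T, h _ _ i (h0 i (by simp))]

lemma pvRangeShift (n : Int) :
    PySem.List.pyRange 1 n 1 = (PySem.List.pyRange 0 (n - 1) 1).map (fun k => k + 1) := by
  simp only [PySem.List.pyRange_one, List.map_map]
  have h : n - 1 - 0 = n - 1 := by ring
  rw [h]
  apply List.map_congr_left
  intro k _
  simp only [Function.comp_apply]
  ring

lemma zetaL_shape (b : Int) (r : List Int) : zetaL (b :: r) = ((zetaL (b :: r)).headD 0) :: (zetaL (b :: r)).tail := by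
  cases r <;> simp [zetaL]

lemma updZ_shift (c : Int) (T : List Int) (i : Int) (h : 0 ≤ i) :
    PySem.List.pySetD (c :: T) (i + 1)
      (PySem.Int.mod (PySem.List.pyGetD (c :: T) (i+1) 0 + PySem.List.pyGetD (c :: T) (i+1+1) 0) pvMod)
    = c :: PySem.List.pySetD T i
      (PySem.Int.mod (PySem.List.pyGetD T i 0 + PySem.List.pyGetD T (i+1) 0) pvMod) := by
  rw [pyGetD_cons_succ _ _ _ h, pyGetD_cons_succ _ _ _ (by omega), pySetD_cons_succ _ _ _ h]

lemma zeta_core : ∀ X : List Int,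
    (PySem.List.pyRange 0 ((X.length : Int) - 1) 1).foldr
      (fun i A => PySem.List.pySetD A i
        (PySem.Int.mod (PySem.List.pyGetD A i 0 + PySem.List.pyGetD A (i+1) 0) pvMod)) X
    = zetaL X := by
  intro X
  induction X with
  | nil => rw [PySem.List.pyRange_one_eq_nil (by norm_num)]; rfl
  | cons a r ih =>
    cases r with
    | nil => rw [PySem.List.pyRange_one_eq_nil (by norm_num)]; rfl
    | cons b r' =>
      have hn : (0:Int) < ((a :: b :: r').length : Int) - 1 := by
        simp only [List.length_cons]; push_cast; omega
      rw [PySem.List.pyRange_one_cons hn, List.foldr_cons]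
      have hb : ((a :: b :: r').length : Int) - 1 = ((b :: r').length : Int) := by
        simp only [List.length_cons]; push_cast; omega
      rw [hb]
      have hr : PySem.List.pyRange ((0:Int)+1) (((b :: r').length : Int)) 1
          = (PySem.List.pyRange 0 (((b :: r').length : Int) - 1) 1).map (fun k => k + 1) := by
        rw [show ((0:Int)+1) = 1 by norm_num, pvRangeShift]
      rw [hr, List.foldr_map]
      rw [pvFoldrShift
            (fun A j => PySem.List.pySetD A j
              (PySem.Int.mod (PySem.List.pyGetD A j 0 + PySem.List.pyGetD A (j+1) 0) pvMod))
            (fun A j => PySem.List.pySetD A j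
              (PySem.Int.mod (PySem.List.pyGetD A j 0 + PySem.List.pyGetD A (j+1) 0) pvMod))
            (fun c T i hi => updZ_shift c T i hi)
            (PySem.List.pyRange 0 (((b :: r').length : Int) - 1) 1)
            (fun i hi => (PySem.List.mem_pyRange_one.1 hi).1) a (b :: r')]
      rw [ih]
      rw [zetaL_shape b r', pySetD_zero_cons]
      simp only [PySem.List.pyGetD_zero_cons]
      rw [pyGetD_cons_succ _ _ _ le_rfl, PySem.List.pyGetD_zero_cons]
      rw [← zetaL_shape b r']
      simp only [zetaL]

lemma zeta_eq (X : List Int) : moreZeta X = zetaL X := by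
  unfold moreZeta
  have h : ((X.length : Int) - 2) = (-1 + 1) + ((X.length : Int) - 1) - 1 := by ring
  rw [PySem.List.pyRange_neg_one_eq_reverse, List.foldl_reverse]
  have h2 : ((X.length:Int) - 2 + 1) = (X.length : Int) - 1 := by ring
  rw [h2]
  have h3 : (-1 : Int) + 1 = 0 := by norm_num
  rw [h3]
  exact zeta_core X

def mobL : List Int → List Int
  | [] => []
  | [a] => [a]
  | a :: b :: r => PySem.Int.mod (a - b) pvMod :: mobL (b :: r)

lemma pvFoldlShift {α : Type} (F G : List α → Int → List α)
    (h : ∀ (c : α) (T : List α) (i : Int), 0 ≤ i → F (c :: T) (i + 1) = c :: G T i) :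
    ∀ (l : List Int), (∀ i ∈ l, 0 ≤ i) → ∀ (c : α) (T : List α),
      l.foldl (fun A i => F A (i + 1)) (c :: T) = c :: l.foldl G T := by
  intro l
  induction l with
  | nil => intro _ c T; rfl
  | cons i l ih =>
    intro h0 c T
    simp only [List.foldl_cons]
    rw [h c T i (h0 i (by simp))]
    exact ih (fun j hj => h0 j (by simp [hj])) c (G T i)

lemma updM_shift (c : Int) (T : List Int) (i : Int) (h : 0 ≤ i) :
    PySem.List.pySetD (c :: T) (i + 1)
      (PySem.Int.mod (PySem.List.pyGetD (c :: T) (i+1) 0 - PySem.List.pyGetD (c :: T) (i+1+1) 0) pvMod)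
    = c :: PySem.List.pySetD T i
      (PySem.Int.mod (PySem.List.pyGetD T i 0 - PySem.List.pyGetD T (i+1) 0) pvMod) := by
  rw [pyGetD_cons_succ _ _ _ h, pyGetD_cons_succ _ _ _ (by omega), pySetD_cons_succ _ _ _ h]

lemma mob_eq : ∀ X : List Int, moreMobius X = mobL X := by
  intro X
  induction X with
  | nil => unfold moreMobius; rw [PySem.List.pyRange_one_eq_nil (by norm_num)]; rfl
  | cons a r ih =>
    cases r with
    | nil => unfold moreMobius; rw [PySem.List.pyRange_one_eq_nil (by norm_num)]; rfl
    | cons b r' =>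
      unfold moreMobius
      have hn : (0:Int) < ((a :: b :: r').length : Int) - 1 := by
        simp only [List.length_cons]; push_cast; omega
      rw [PySem.List.pyRange_one_cons hn, List.foldl_cons]
      have hb : ((a :: b :: r').length : Int) - 1 = ((b :: r').length : Int) := by
        simp only [List.length_cons]; push_cast; omega
      rw [hb]
      have hr : PySem.List.pyRange ((0:Int)+1) (((b :: r').length : Int)) 1
          = (PySem.List.pyRange 0 (((b :: r').length : Int) - 1) 1).map (fun k => k + 1) := by
        rw [show ((0:Int)+1) = 1 by norm_num, pvRangeShift]
      rw [hr, List.foldl_map]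
      have hstep : PySem.List.pySetD (a :: b :: r') 0
          (PySem.Int.mod (PySem.List.pyGetD (a :: b :: r') 0 0 - PySem.List.pyGetD (a :: b :: r') (0+1) 0) pvMod)
          = PySem.Int.mod (a - b) pvMod :: b :: r' := by
        rw [pyGetD_cons_succ _ _ _ le_rfl, PySem.List.pyGetD_zero_cons, PySem.List.pyGetD_zero_cons,
            pySetD_zero_cons]
      rw [hstep]
      rw [pvFoldlShift
            (fun A j => PySem.List.pySetD A j
              (PySem.Int.mod (PySem.List.pyGetD A j 0 - PySem.List.pyGetD A (j+1) 0) pvMod))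
            (fun A j => PySem.List.pySetD A j
              (PySem.Int.mod (PySem.List.pyGetD A j 0 - PySem.List.pyGetD A (j+1) 0) pvMod))
            (fun c T i hi => updM_shift c T i hi)
            (PySem.List.pyRange 0 (((b :: r').length : Int) - 1) 1)
            (fun i hi => (PySem.List.mem_pyRange_one.1 hi).1) _ (b :: r')]
      rw [show (PySem.List.pyRange 0 (((b :: r').length : Int) - 1) 1).foldl
            (fun A j => PySem.List.pySetD A j
              (PySem.Int.mod (PySem.List.pyGetD A j 0 - PySem.List.pyGetD A (j+1) 0) pvMod)) (b :: r')
            = moreMobius (b :: r') from rfl]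
      rw [ih]
      simp only [mobL]

lemma mul_eq : ∀ (X Y : List Int), X.length = Y.length →
    (PySem.List.pyRange 0 (X.length : Int) 1).foldl
      (fun A i => PySem.List.pySetD A i
        (PySem.Int.mod (PySem.List.pyGetD A i 0 * PySem.List.pyGetD Y i 0) pvMod)) X
    = List.zipWith (fun a b => PySem.Int.mod (a * b) pvMod) X Y := by
  intro X
  induction X with
  | nil => intro Y h; rw [PySem.List.pyRange_one_eq_nil (by norm_num)]; simp
  | cons x X' ih =>
    intro Y h
    cases Y with
    | nil => simp at h
    | cons y Y' =>
      have hn : (0:Int) < ((x :: X').length : Int) := by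
        simp only [List.length_cons]; push_cast; omega
      rw [PySem.List.pyRange_one_cons hn, List.foldl_cons]
      have hstep : PySem.List.pySetD (x :: X') 0
          (PySem.Int.mod (PySem.List.pyGetD (x :: X') 0 0 * PySem.List.pyGetD (y :: Y') 0 0) pvMod)
          = PySem.Int.mod (x * y) pvMod :: X' := by
        rw [PySem.List.pyGetD_zero_cons, PySem.List.pyGetD_zero_cons, pySetD_zero_cons]
      rw [hstep]
      have hb : ((x :: X').length : Int) = ((X'.length : Int)) + 1 := by
        simp only [List.length_cons]; push_cast; ring
      have hr : PySem.List.pyRange ((0:Int)+1) (((x :: X').length : Int)) 1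
          = (PySem.List.pyRange 0 ((X'.length : Int)) 1).map (fun k => k + 1) := by
        rw [show ((0:Int)+1) = 1 by norm_num, pvRangeShift, hb]
        norm_num
      rw [hr, List.foldl_map]
      rw [pvFoldlShift
            (fun A j => PySem.List.pySetD A j
              (PySem.Int.mod (PySem.List.pyGetD A j 0 * PySem.List.pyGetD (y :: Y') j 0) pvMod))
            (fun A j => PySem.List.pySetD A j
              (PySem.Int.mod (PySem.List.pyGetD A j 0 * PySem.List.pyGetD Y' j 0) pvMod))
            (fun c T i hi => by
              simp only []
              rw [pyGetD_cons_succ _ _ _ hi, pyGetD_cons_succ _ _ _ hi, pySetD_cons_succ _ _ _ hi])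
            (PySem.List.pyRange 0 ((X'.length : Int)) 1)
            (fun i hi => (PySem.List.mem_pyRange_one.1 hi).1) _ X']
      rw [ih Y' (by simpa using h)]
      rfl

def sfx : List Int → List Int
  | [] => [0]
  | x :: r => PySem.Int.mod (x + (sfx r).headD 0) pvMod :: sfx r

def comboR : List Int → List Int → List Int
  | a :: As, b :: Bs =>
      PySem.Int.mod (a * (sfx (b :: Bs)).headD 0 + (sfx As).headD 0 * b) pvMod :: comboR As Bs
  | _, _ => []

lemma pyGetD_zero_headD (Y : List Int) : PySem.List.pyGetD Y 0 0 = Y.headD 0 := by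
  cases Y with
  | nil => rfl
  | cons y t => rw [PySem.List.pyGetD_zero_cons]; rfl

lemma sfx_shape (X : List Int) : sfx X = ((sfx X).headD 0) :: (sfx X).tail := by
  cases X <;> simp [sfx]

lemma sfx_fold : ∀ X : List Int,
    X.reverse.foldl (fun acc a => acc ++ [PySem.Int.mod (a + PySem.List.pyGetD acc (-1) 0) pvMod]) [0]
    = (sfx X).reverse := by
  intro X
  induction X with
  | nil => rfl
  | cons x r ih =>
    rw [List.reverse_cons, List.foldl_append, ih, List.foldl_cons, List.foldl_nil]
    rw [sfx_shape r, List.reverse_cons, PySem.List.pyGetD_neg_one_append_singleton,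
        ← List.reverse_cons, ← sfx_shape r]
    have : sfx (x :: r) = PySem.Int.mod (x + (sfx r).headD 0) pvMod :: sfx r := rfl
    rw [this, List.reverse_cons]

lemma mapRange_combo : ∀ (As Bs : List Int), As.length = Bs.length →
    (PySem.List.pyRange 0 (As.length : Int) 1).map (fun k =>
      PySem.Int.mod (PySem.List.pyGetD As k 0 * PySem.List.pyGetD (sfx Bs) k 0
        + PySem.List.pyGetD (sfx As) (k + 1) 0 * PySem.List.pyGetD Bs k 0) pvMod)
    = comboR As Bs := by
  intro As
  induction As with
  | nil => intro Bs h; rw [PySem.List.pyRange_one_eq_nil (by norm_num)]; simp [comboR]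
  | cons a As' ih =>
    intro Bs h
    cases Bs with
    | nil => simp at h
    | cons b Bs' =>
      have hn : (0:Int) < ((a :: As').length : Int) := by
        simp only [List.length_cons]; push_cast; omega
      rw [PySem.List.pyRange_one_cons hn, List.map_cons]
      have hhead : PySem.Int.mod (PySem.List.pyGetD (a :: As') 0 0 * PySem.List.pyGetD (sfx (b :: Bs')) 0 0
            + PySem.List.pyGetD (sfx (a :: As')) (0 + 1) 0 * PySem.List.pyGetD (b :: Bs') 0 0) pvMod
          = PySem.Int.mod (a * (sfx (b :: Bs')).headD 0 + (sfx As').headD 0 * b) pvMod := by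
        rw [show sfx (a :: As') = PySem.Int.mod (a + (sfx As').headD 0) pvMod :: sfx As' from rfl]
        rw [pyGetD_cons_succ _ _ _ le_rfl]
        simp only [PySem.List.pyGetD_zero_cons, pyGetD_zero_headD]
      rw [hhead]
      have hb : ((a :: As').length : Int) = ((As'.length : Int)) + 1 := by
        simp only [List.length_cons]; push_cast; ring
      have hr : PySem.List.pyRange ((0:Int)+1) (((a :: As').length : Int)) 1
          = (PySem.List.pyRange 0 ((As'.length : Int)) 1).map (fun k => k + 1) := by
        rw [show ((0:Int)+1) = 1 by norm_num, pvRangeShift, hb]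
        norm_num
      rw [hr, List.map_map]
      have hmap : (PySem.List.pyRange 0 ((As'.length : Int)) 1).map
            ((fun k => PySem.Int.mod (PySem.List.pyGetD (a :: As') k 0 * PySem.List.pyGetD (sfx (b :: Bs')) k 0
              + PySem.List.pyGetD (sfx (a :: As')) (k + 1) 0 * PySem.List.pyGetD (b :: Bs') k 0) pvMod)
              ∘ (fun k => k + 1))
          = (PySem.List.pyRange 0 ((As'.length : Int)) 1).map
            (fun k => PySem.Int.mod (PySem.List.pyGetD As' k 0 * PySem.List.pyGetD (sfx Bs') k 0
              + PySem.List.pyGetD (sfx As') (k + 1) 0 * PySem.List.pyGetD Bs' k 0) pvMod) := by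
        apply List.map_congr_left
        intro k hk
        have hk0 : (0:Int) ≤ k := (PySem.List.mem_pyRange_one.1 hk).1
        simp only [Function.comp_apply]
        rw [show sfx (b :: Bs') = PySem.Int.mod (b + (sfx Bs').headD 0) pvMod :: sfx Bs' from rfl]
        rw [show sfx (a :: As') = PySem.Int.mod (a + (sfx As').headD 0) pvMod :: sfx As' from rfl]
        rw [pyGetD_cons_succ _ _ _ hk0, pyGetD_cons_succ _ _ _ hk0, pyGetD_cons_succ _ _ _ hk0,
            show k + 1 + 1 = (k + 1) + 1 from rfl, pyGetD_cons_succ _ _ _ (by omega)]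
      rw [hmap, ih Bs' (by simpa using h)]
      rfl

lemma pvmod_emod (a : Int) : PySem.Int.mod a pvMod = a % pvMod :=
  PySem.Int.mod_eq_emod_of_pos (by norm_num [pvMod])

lemma pm (x : Int) : Int.ModEq pvMod (x % pvMod) x := Int.emod_emod_of_dvd x dvd_rfl

lemma zeta_head_congr : ∀ X : List Int, (zetaL X).headD 0 ≡ (sfx X).headD 0 [ZMOD pvMod] := by
  intro X
  induction X with
  | nil => simp [zetaL, sfx]
  | cons a r ih =>
    cases r with
    | nil =>
      rw [show (zetaL [a]).headD 0 = a from rfl,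
          show (sfx [a]).headD 0 = PySem.Int.mod (a + 0) pvMod from rfl, pvmod_emod]
      exact ((pm (a + 0)).trans (by rw [add_zero])).symm
    | cons b r' =>
      rw [show (zetaL (a :: b :: r')).headD 0
            = PySem.Int.mod (a + (zetaL (b :: r')).headD 0) pvMod from rfl,
          show (sfx (a :: b :: r')).headD 0
            = PySem.Int.mod (a + (sfx (b :: r')).headD 0) pvMod from rfl,
          pvmod_emod, pvmod_emod]
      exact ((pm _).trans (Int.ModEq.add_left a ih)).trans (pm _).symm

lemma zetaL_length : ∀ X : List Int, (zetaL X).length = X.length := by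
  intro X
  induction X with
  | nil => rfl
  | cons a r ih =>
    cases r with
    | nil => rfl
    | cons b r' => simp only [zetaL, List.length_cons] at ih ⊢; omega

lemma main_combo : ∀ (As Bs : List Int), As.length = Bs.length →
    mobL (List.zipWith (fun a b => PySem.Int.mod (a * b) pvMod) (zetaL As) (zetaL Bs))
    = comboR As Bs := by
  intro As
  induction As with
  | nil =>
    intro Bs h
    cases Bs with
    | nil => rfl
    | cons b t => simp at h
  | cons a rA ih =>
    intro Bs h
    cases Bs with
    | nil => simp at h
    | cons b rB =>
      cases rA with
      | nil =>
        cases rB with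
        | nil =>
          show [PySem.Int.mod (a * b) pvMod]
            = [PySem.Int.mod (a * (sfx [b]).headD 0 + (sfx ([] : List Int)).headD 0 * b) pvMod]
          refine congrArg (fun z => [z]) ?_
          rw [show (sfx [b]).headD 0 = PySem.Int.mod (b + 0) pvMod from rfl,
              show (sfx ([] : List Int)).headD 0 = 0 from rfl, pvmod_emod, pvmod_emod, pvmod_emod]
          have h1 : Int.ModEq pvMod ((b + 0) % pvMod) b := (pm (b + 0)).trans (by rw [add_zero])
          have hX : Int.ModEq pvMod (a * ((b + 0) % pvMod) + 0 * b) (a * b) :=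
            Int.ModEq.trans ((h1.mul_left a).add_right (0 * b)) (by rw [zero_mul, add_zero])
          exact hX.symm
        | cons b2 rB' => simp at h
      | cons a2 rA' =>
        cases rB with
        | nil => simp at h
        | cons b2 rB' =>
          obtain ⟨hA, tA, eA⟩ : ∃ h t, zetaL (a2 :: rA') = h :: t := ⟨_, _, zetaL_shape a2 rA'⟩
          obtain ⟨hB, tB, eB⟩ : ∃ h t, zetaL (b2 :: rB') = h :: t := ⟨_, _, zetaL_shape b2 rB'⟩
          have hAc := zeta_head_congr (a2 :: rA')
          have hBc := zeta_head_congr (b2 :: rB')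
          rw [eA] at hAc
          rw [eB] at hBc
          simp only [List.headD_cons] at hAc hBc
          rw [show zetaL (a :: a2 :: rA')
                = PySem.Int.mod (a + (zetaL (a2 :: rA')).headD 0) pvMod :: zetaL (a2 :: rA') from rfl,
              show zetaL (b :: b2 :: rB')
                = PySem.Int.mod (b + (zetaL (b2 :: rB')).headD 0) pvMod :: zetaL (b2 :: rB') from rfl,
              eA, eB]
          simp only [List.headD_cons, List.zipWith_cons_cons]
          simp only [mobL]
          rw [show (PySem.Int.mod (hA * hB) pvMod
                :: List.zipWith (fun a b => PySem.Int.mod (a * b) pvMod) tA tB)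
              = List.zipWith (fun a b => PySem.Int.mod (a * b) pvMod) (hA :: tA) (hB :: tB) from rfl,
              ← eA, ← eB, ih (b2 :: rB') (by simpa using h)]
          rw [show comboR (a :: a2 :: rA') (b :: b2 :: rB')
                = PySem.Int.mod (a * (sfx (b :: b2 :: rB')).headD 0
                    + (sfx (a2 :: rA')).headD 0 * b) pvMod :: comboR (a2 :: rA') (b2 :: rB') from rfl]
          refine congrArg (fun z => z :: comboR (a2 :: rA') (b2 :: rB')) ?_
          rw [show (sfx (b :: b2 :: rB')).headD 0
                = PySem.Int.mod (b + (sfx (b2 :: rB')).headD 0) pvMod from rfl]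
          simp only [pvmod_emod]
          have h1 : Int.ModEq pvMod (((a + hA) % pvMod) * ((b + hB) % pvMod))
              ((a + (sfx (a2 :: rA')).headD 0) * (b + (sfx (b2 :: rB')).headD 0)) :=
            Int.ModEq.mul ((pm _).trans (hAc.add_left a)) ((pm _).trans (hBc.add_left b))
          have h2 : Int.ModEq pvMod
              ((((a + hA) % pvMod) * ((b + hB) % pvMod)) % pvMod - (hA * hB) % pvMod)
              ((a + (sfx (a2 :: rA')).headD 0) * (b + (sfx (b2 :: rB')).headD 0)
                - (sfx (a2 :: rA')).headD 0 * (sfx (b2 :: rB')).headD 0) :=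
            Int.ModEq.sub ((pm _).trans h1) ((pm _).trans (hAc.mul hBc))
          have h3 : Int.ModEq pvMod
              (a * ((b + (sfx (b2 :: rB')).headD 0) % pvMod) + (sfx (a2 :: rA')).headD 0 * b)
              (a * (b + (sfx (b2 :: rB')).headD 0) + (sfx (a2 :: rA')).headD 0 * b) :=
            Int.ModEq.add_right _ (Int.ModEq.mul_left a (pm _))
          refine h2.trans ?_
          rw [show (a + (sfx (a2 :: rA')).headD 0) * (b + (sfx (b2 :: rB')).headD 0)
                - (sfx (a2 :: rA')).headD 0 * (sfx (b2 :: rB')).headD 0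
              = a * (b + (sfx (b2 :: rB')).headD 0) + (sfx (a2 :: rA')).headD 0 * b from by ring]
          exact h3.symm

-- ===== VERDICT (by name: the statement is the Claim_ definition above) =====
theorem Convolution_MIN_spec : Claim_equal_Convolution_MIN := by
  intro A B _
  unfold Spec_Convolution_MIN
  simp only [Convolution_MIN, Convolution_MIN_alt]
  set L := max A.length B.length with hL
  set A2 := A ++ List.replicate (L - A.length) 0 with hA2def
  set B2 := B ++ List.replicate (L - B.length) 0 with hB2def
  have hA2 : A2.length = L := by simp [hA2def]; omega
  have hB2 : B2.length = L := by simp [hB2def]; omega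
  -- A side
  have hbound : (L : Int) = ((moreZeta A2).length : Int) := by
    rw [zeta_eq, zetaL_length, hA2]
  rw [hbound, zeta_eq A2, zeta_eq B2]
  rw [mul_eq (zetaL A2) (zetaL B2) (by rw [zetaL_length, zetaL_length, hA2, hB2])]
  rw [mob_eq, main_combo A2 B2 (by rw [hA2, hB2])]
  -- B side
  rw [PySem.List.foldl_prod_mk
        (f := fun acc (ab : Int × Int) => acc ++ [PySem.Int.mod (ab.1 + PySem.List.pyGetD acc (-1) 0) pvMod])
        (g := fun acc (ab : Int × Int) => acc ++ [PySem.Int.mod (ab.2 + PySem.List.pyGetD acc (-1) 0) pvMod])]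
  have hzlen : A2.reverse.length = B2.reverse.length := by
    simp [hA2, hB2]
  have c1 : (List.zip A2.reverse B2.reverse).foldl
      (fun acc (ab : Int × Int) => acc ++ [PySem.Int.mod (ab.1 + PySem.List.pyGetD acc (-1) 0) pvMod]) [0]
      = (sfx A2).reverse := by
    rw [← List.foldl_map (f := (Prod.fst : Int × Int → Int))
          (g := fun acc (a : Int) => acc ++ [PySem.Int.mod (a + PySem.List.pyGetD acc (-1) 0) pvMod]),
        List.map_fst_zip (le_of_eq hzlen), sfx_fold]
  have c2 : (List.zip A2.reverse B2.reverse).foldl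
      (fun acc (ab : Int × Int) => acc ++ [PySem.Int.mod (ab.2 + PySem.List.pyGetD acc (-1) 0) pvMod]) [0]
      = (sfx B2).reverse := by
    rw [← List.foldl_map (f := (Prod.snd : Int × Int → Int))
          (g := fun acc (a : Int) => acc ++ [PySem.Int.mod (a + PySem.List.pyGetD acc (-1) 0) pvMod]),
        List.map_snd_zip (le_of_eq hzlen.symm), sfx_fold]
  rw [c1, c2, List.reverse_reverse, List.reverse_reverse]
  have hbound2 : ((zetaL A2).length : Int) = (A2.length : Int) := by rw [zetaL_length]
  rw [hbound2, mapRange_combo A2 B2 (by rw [hA2, hB2])]
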